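-- pv_equiv track=rewrite | github.com/camrdale/advent-of-code | year2023/day13/part1.py | is_reflection
-- ===== SOURCE A (Python) =====
-- def is_reflection(pattern: list[str], row: int) -> bool:
--     reflected_row = row + 1
--     while row >= 0 and reflected_row < len(pattern):
--         if pattern[row] != pattern[reflected_row]:
--             return False
--         row -= 1
--         reflected_row += 1
--     return True
-- ===== SOURCE B (Python) =====
-- def is_reflection(pattern: list[str], row: int) -> bool:
--     n = len(pattern)
--     k = min(row + 1, n - row - 1)
--     if k <= 0:
--         return True
--     return pattern[row + 1 - k:row + 1][::-1] == pattern[row + 1:row + 1 + k]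
-- ===== Notes on version B (the rewrite author's own statement) =====
-- stated objective: alternative
-- what changed: Replaces the two outward-moving pointers with a closed-form overlap count k and one bulk comparison of the reversed left slice against the right slice.
import Mathlib
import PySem

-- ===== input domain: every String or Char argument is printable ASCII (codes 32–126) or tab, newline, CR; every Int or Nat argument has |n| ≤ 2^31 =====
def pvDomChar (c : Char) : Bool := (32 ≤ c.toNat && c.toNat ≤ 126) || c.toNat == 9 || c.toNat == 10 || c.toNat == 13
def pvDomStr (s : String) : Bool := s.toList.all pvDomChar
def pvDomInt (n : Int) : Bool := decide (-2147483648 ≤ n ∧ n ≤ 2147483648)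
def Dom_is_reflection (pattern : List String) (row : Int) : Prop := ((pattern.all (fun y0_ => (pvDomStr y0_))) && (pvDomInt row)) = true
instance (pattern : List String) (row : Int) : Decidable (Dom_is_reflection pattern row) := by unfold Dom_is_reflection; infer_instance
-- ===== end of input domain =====

-- B replaces A's two outward-moving pointers with a closed-form overlap count k and one
-- bulk comparison of the reversed left slice against the right slice (alternative decomposition).


-- ===== PORT A =====
-- the while loop: state (row, reflected_row); terminates because reflected_row increases
def isReflLoop (pattern : List String) (fuel : Nat) (row reflected : Int) : Bool :=
  match fuel with
  | 0 => true
  | f + 1 =>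
    if 0 ≤ row ∧ reflected < (pattern.length : Int) then
      if PySem.List.pyGet? pattern row ≠ PySem.List.pyGet? pattern reflected then false
      else isReflLoop pattern f (row - 1) (reflected + 1)
    else true

-- fuel pattern.length bounds the iteration count: each iteration needs reflected < len,
-- and reflected starts at row+1 ≥ 1 when any iteration runs
def is_reflection (pattern : List String) (row : Int) : Bool :=
  isReflLoop pattern pattern.length row (row + 1)

-- ===== PORT B =====
def is_reflection_alt (pattern : List String) (row : Int) : Bool :=
  let n : Int := pattern.length
  let k : Int := min (row + 1) (n - row - 1)
  if k ≤ 0 then true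
  else
    (PySem.List.slice pattern (some (row + 1 - k)) (some (row + 1))).reverse
      == PySem.List.slice pattern (some (row + 1)) (some (row + 1 + k))

-- ===== PRECONDITION & SPEC =====
def Spec_is_reflection (pattern : List String) (row : Int) (out : Bool) : Prop := out = is_reflection_alt pattern row
instance (pattern : List String) (row : Int) (out : Bool) : Decidable (Spec_is_reflection pattern row out) := by unfold Spec_is_reflection; infer_instance

-- ===== CLAIM (what is proved, stated in full; the proofs are below) =====
def Claim_equal_is_reflection : Prop := ∀ (pattern : List String) (row : Int), Dom_is_reflection pattern row → Spec_is_reflection pattern row (is_reflection pattern row)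

-- ===== LEMMAS AND PROOFS =====

-- a slice with equal bounds is empty
theorem slice_self_eq_nil (xs : List String) (a : Int) :
    PySem.List.slice xs (some a) (some a) = [] := by
  have h := PySem.List.length_slice xs a a
  have : (PySem.List.slice xs (some a) (some a)).length = 0 := by omega
  exact List.eq_nil_of_length_eq_zero this

-- append the last element: xs[a : b+1] = xs[a : b] ++ [xs[b]]
theorem slice_snoc (xs : List String) (a b : Int) (ha : 0 ≤ a) (_hab : a ≤ b)
    (_hb : b < (xs.length : Int)) (hlt : b.toNat < xs.length) :
    PySem.List.slice xs (some a) (some (b + 1)) =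
      PySem.List.slice xs (some a) (some b) ++ [xs[b.toNat]] := by
  rw [PySem.List.slice_toNat xs ha (by omega), PySem.List.slice_toNat xs ha (by omega)]
  have h1 : (b + 1).toNat - a.toNat = (b.toNat - a.toNat) + 1 := by omega
  rw [h1, List.take_add_one]
  congr 1
  have hd : (xs.drop a.toNat)[b.toNat - a.toNat]? = xs[b.toNat]? := by
    rw [List.getElem?_drop]; congr 1; omega
  rw [hd, List.getElem?_eq_getElem hlt]
  rfl

-- peel the first element: xs[b : b+m] = xs[b] :: xs[b+1 : b+m]
theorem slice_cons (xs : List String) (b m : Int) (hb : 0 ≤ b) (hm : 1 ≤ m)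
    (hlt : b.toNat < xs.length) :
    PySem.List.slice xs (some b) (some (b + m)) =
      xs[b.toNat] :: PySem.List.slice xs (some (b + 1)) (some (b + m)) := by
  rw [PySem.List.slice_toNat xs hb (by omega), PySem.List.slice_toNat xs (by omega) (by omega)]
  rw [List.drop_eq_getElem_cons hlt]
  have h1 : (b + m).toNat - b.toNat = ((b + m).toNat - (b + 1).toNat) + 1 := by omega
  have h2 : (b + 1).toNat = b.toNat + 1 := by omega
  rw [h1, h2, List.take_succ_cons]

theorem pyGet?_of_inrange (xs : List String) (i : Int) (h0 : 0 ≤ i)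
    (hlt : i.toNat < xs.length) :
    PySem.List.pyGet? xs i = some xs[i.toNat] := by
  have h1 : i = ((i.toNat : Nat) : Int) := by omega
  conv_lhs => rw [h1]
  rw [PySem.List.pyGet?_natCast]
  exact List.getElem?_eq_getElem hlt

-- the loop computes the bulk comparison of B, for any state with row < reflected
theorem loop_eq_slices (m : Nat) : ∀ (fuel : Nat) (xs : List String) (r refl : Int),
    r < refl →
    (m : Int) = max 0 (min (r + 1) ((xs.length : Int) - refl)) →
    m ≤ fuel →
    isReflLoop xs fuel r refl =
      ((PySem.List.slice xs (some (r + 1 - (m : Int))) (some (r + 1))).reverse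
        == PySem.List.slice xs (some refl) (some (refl + (m : Int)))) := by
  induction m with
  | zero =>
    intro fuel xs r refl hlt hm hfuel
    have hc : ¬ (0 ≤ r ∧ refl < (xs.length : Int)) := by omega
    have hloop : isReflLoop xs fuel r refl = true := by
      cases fuel with
      | zero => rfl
      | succ f => simp only [isReflLoop, if_neg hc]
    rw [hloop]
    simp only [Nat.cast_zero, add_zero, sub_zero, slice_self_eq_nil]
    rfl
  | succ k ih =>
    intro fuel xs r refl hlt hm hfuel
    obtain ⟨f, rfl⟩ : ∃ f, fuel = f + 1 := ⟨fuel - 1, by omega⟩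
    have hr0 : 0 ≤ r := by omega
    have hrefl : refl < (xs.length : Int) := by omega
    have hreflNat : refl.toNat < xs.length := by omega
    have hrNat : r.toNat < xs.length := by omega
    simp only [isReflLoop, if_pos (And.intro hr0 hrefl)]
    rw [pyGet?_of_inrange xs r hr0 hrNat, pyGet?_of_inrange xs refl (by omega) hreflNat]
    -- decompose the slices
    have hleft : PySem.List.slice xs (some (r + 1 - ((k : Int) + 1))) (some (r + 1)) =
        PySem.List.slice xs (some (r - (k : Int))) (some r) ++ [xs[r.toNat]] := by
      have he : r + 1 - ((k : Int) + 1) = r - (k : Int) := by ring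
      rw [he]
      exact slice_snoc xs (r - (k : Int)) r (by omega) (by omega) (by omega) hrNat
    have hright : PySem.List.slice xs (some refl) (some (refl + ((k : Int) + 1))) =
        xs[refl.toNat] :: PySem.List.slice xs (some (refl + 1)) (some (refl + ((k : Int) + 1))) := by
      exact slice_cons xs refl ((k : Int) + 1) (by omega) (by omega) hreflNat
    by_cases heq : xs[r.toNat] = xs[refl.toNat]
    · simp only [heq, ne_eq, not_true_eq_false, if_false]
      rw [ih f xs (r - 1) (refl + 1) (by omega) (by omega) (by omega)]
      have he2 : r - 1 + 1 = r := by ring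
      have he3 : refl + 1 + (k : Int) = refl + ((k : Int) + 1) := by ring
      have he4 : r - 1 + 1 - (k : Int) = r - (k : Int) := by ring
      rw [he2, he3, he4] at *
      push_cast [hleft, hright]
      simp [List.cons_beq_cons, heq]
    · simp only [ne_eq]
      push_cast [hleft, hright]
      simp [List.cons_beq_cons, heq]

-- ===== VERDICT (by name: the statement is the Claim_ definition above) =====
theorem is_reflection_spec : Claim_equal_is_reflection := by
  intro pattern row _
  show is_reflection pattern row = is_reflection_alt pattern row
  unfold is_reflection is_reflection_alt
  dsimp only
  by_cases hk0 : min (row + 1) ((pattern.length : Int) - row - 1) ≤ 0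
  · rw [if_pos hk0]
    rw [loop_eq_slices 0 pattern.length pattern row (row + 1) (by omega) (by omega) (by omega)]
    simp [slice_self_eq_nil]
  · rw [if_neg hk0]
    have hkNat : (((min (row + 1) ((pattern.length : Int) - row - 1)).toNat : Nat) : Int)
        = min (row + 1) ((pattern.length : Int) - row - 1) := by omega
    rw [loop_eq_slices (min (row + 1) ((pattern.length : Int) - row - 1)).toNat pattern.length
      pattern row (row + 1) (by omega) (by rw [hkNat]; omega) (by omega)]
    rw [hkNat]
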